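-- pv_equiv track=rewrite | github.com/chrismuntean/Pursuit-Alert | vid_demo_log_v6.py | temporal_redundancy_voting
-- ===== SOURCE A (Python) =====
-- from collections import Counter
--
-- def temporal_redundancy_voting(plates):
--
--     # Extracting plate strings
--     plate_strings = [plate['plate'] for plate in plates]
--
--     # Determine the maximum length of the plates
--     max_length = max(len(plate) for plate in plate_strings)
--
--     # Initialize a list to hold the voted characters for each position
--     voted_characters = []
--
--     # Iterate through each position
--     for i in range(max_length):
--         char_counter = Counter()
--
--         # Count characters at the current position for each plate and count blanks
--         num_blanks = 0
--         for plate in plate_strings: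
--             if i < len(plate):
--                 char_counter[plate[i]] += 1
--             else:
--                 num_blanks += 1
--
--         # If blanks are the majority, stop adding more characters
--         if num_blanks > len(plate_strings) / 2:
--             break
--
--         # Find the most common character for this position
--         most_common_char, _ = char_counter.most_common(1)[0]
--         voted_characters.append(most_common_char)
--
--     # Join the characters to form the final voted plate
--     voted_plate = ''.join(voted_characters)
--     return voted_plate
-- ===== SOURCE B (Python) =====
-- from collections import Counter
--
-- def temporal_redundancy_voting(plates):
--     plate_strings = [plate['plate'] for plate in plates]
--     n = len(plate_strings)
--     max_length = max(len(p) for p in plate_strings)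
--
--     # One pass over the plates: per-position character counters and present counts
--     counters = [Counter() for _ in range(max_length)]
--     present = [0] * max_length
--     for p in plate_strings:
--         for i, ch in enumerate(p):
--             counters[i][ch] += 1
--             present[i] += 1
--
--     # Second pass over positions; blanks at i = n - present[i]
--     voted = []
--     for i in range(max_length):
--         if (n - present[i]) > n / 2:
--             break
--         voted.append(counters[i].most_common(1)[0][0])
--     return ''.join(voted)
-- ===== Notes on version B (the rewrite author's own statement) =====
-- stated objective: alternative
-- what changed: Instead of re-scanning all plates once per position, B makes one pass over the plates filling per-position Counters and present counts, then a second pass over positions that breaks on blank majority and picks each most_common(1) winner.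
import Mathlib
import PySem

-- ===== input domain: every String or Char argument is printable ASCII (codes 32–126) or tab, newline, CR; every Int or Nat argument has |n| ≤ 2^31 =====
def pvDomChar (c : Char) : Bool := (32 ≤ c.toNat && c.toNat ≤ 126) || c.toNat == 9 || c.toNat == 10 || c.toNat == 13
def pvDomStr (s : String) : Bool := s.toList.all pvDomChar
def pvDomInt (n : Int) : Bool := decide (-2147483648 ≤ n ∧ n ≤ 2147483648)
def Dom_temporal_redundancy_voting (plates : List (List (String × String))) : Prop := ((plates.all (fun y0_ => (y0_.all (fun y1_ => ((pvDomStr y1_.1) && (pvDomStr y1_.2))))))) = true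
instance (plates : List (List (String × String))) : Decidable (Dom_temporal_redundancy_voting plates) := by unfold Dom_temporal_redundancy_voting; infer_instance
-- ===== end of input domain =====

-- B builds all per-position counters (and present counts) in ONE pass over the plates, then a second
-- pass over positions; same cost class, different decomposition (objective: alternative).

-- ===== PORT A =====
-- shared helpers: both Pythons read plate['plate'], use Counter[c] += 1 and Counter.most_common(1)[0]
def trvPlateStrings (plates : List (List (String × String))) : List (List Char) :=
  plates.map (fun d => (((PySem.Dict.mk d).get? "plate").getD "").toList)

-- Counter[ch] += 1
def trvCount (c : PySem.Dict Char Int) (ch : Char) : PySem.Dict Char Int :=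
  PySem.Dict.modify c ch 0 (· + 1)

-- counter.most_common(1)[0][0]: first key attaining the maximal count (most_common sorts by count
-- descending, stably, so the head is the first-inserted key with maximal count).
-- Python raises IndexError on an empty counter; that is unreachable in both programs (see loops).
def trvMostCommon1 (items : List (Char × Int)) : Char :=
  match items with
  | [] => ' '
  | kv :: rest => (rest.foldl (fun best x => if x.2 > best.2 then x else best) kv).1

-- the 'for i in range(max_length)' loop with its break; per position one pass over all plates.
-- 'num_blanks > len(plate_strings) / 2' (exact float comparison) is ported as 2 * blanks > n.
def trvLoopA (ps : List (List Char)) (maxLen : Nat) (i : Nat) (acc : List Char) : List Char :=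
  if i < maxLen then
    let st := ps.foldl
      (fun (st : PySem.Dict Char Int × Nat) p =>
        if h : i < p.length then (trvCount st.1 p[i], st.2) else (st.1, st.2 + 1))
      ((PySem.Dict.empty : PySem.Dict Char Int), 0)
    if 2 * st.2 > ps.length then acc
    else trvLoopA ps maxLen (i + 1) (acc ++ [trvMostCommon1 st.1.items])
  else acc
termination_by maxLen - i

def temporal_redundancy_voting (plates : List (List (String × String))) : String :=
  let ps := trvPlateStrings plates
  -- max(len(p) for p in plate_strings): raises ValueError on empty input (excluded by Pre_)
  let maxLen := (ps.map List.length).max?.getD 0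
  String.ofList (trvLoopA ps maxLen 0 [])

-- ===== PORT B =====
-- 'for i, ch in enumerate(p): counters[i][ch] += 1; present[i] += 1' on the fused table
def trvBump : List (PySem.Dict Char Int × Nat) → List Char → List (PySem.Dict Char Int × Nat)
  | ts, [] => ts
  | [], _ :: _ => []
  | (c, m) :: ts, ch :: rest => (trvCount c ch, m + 1) :: trvBump ts rest

-- second pass over positions: break as soon as blanks (= n - present) are a majority
def trvLoopB (n : Nat) : List (PySem.Dict Char Int × Nat) → List Char
  | [] => []
  | (cnt, pres) :: rest =>
    if 2 * (n - pres) > n then []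
    else trvMostCommon1 cnt.items :: trvLoopB n rest

def temporal_redundancy_voting_alt (plates : List (List (String × String))) : String :=
  let ps := trvPlateStrings plates
  let n := ps.length
  let maxLen := (ps.map List.length).max?.getD 0
  let tables := ps.foldl trvBump (List.replicate maxLen ((PySem.Dict.empty : PySem.Dict Char Int), 0))
  String.ofList (trvLoopB n tables)

-- ===== PRECONDITION & SPEC =====
-- Pre_ excludes exactly the crashes of A: empty input (max() raises ValueError) and a plate dict
-- without the key 'plate' (KeyError).  B raises the same exceptions there.
def Pre_temporal_redundancy_voting (plates : List (List (String × String))) : Prop :=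
  plates ≠ [] ∧ ∀ d ∈ plates, "plate" ∈ d.map Prod.fst
instance (plates : List (List (String × String))) : Decidable (Pre_temporal_redundancy_voting plates) := by unfold Pre_temporal_redundancy_voting; infer_instance

def pvWitness_temporal_redundancy_voting : (List (List (String × String))) :=
  [[("plate", "ABC123")], [("plate", "ABC128")], [("plate", "A8C123")]]

def Spec_temporal_redundancy_voting (plates : List (List (String × String))) (out : String) : Prop := out = temporal_redundancy_voting_alt plates
instance (plates : List (List (String × String))) (out : String) : Decidable (Spec_temporal_redundancy_voting plates out) := by unfold Spec_temporal_redundancy_voting; infer_instance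

-- ===== CLAIM (what is proved, stated in full; the proofs are below) =====
def Claim_equal_temporal_redundancy_voting : Prop := ∀ (plates : List (List (String × String))), Dom_temporal_redundancy_voting plates → Pre_temporal_redundancy_voting plates → Spec_temporal_redundancy_voting plates (temporal_redundancy_voting plates)

-- ===== LEMMAS AND PROOFS =====

-- per-position step B applies to the table entry at position i while folding one plate p
def trvStep (i : Nat) (t : PySem.Dict Char Int × Nat) (p : List Char) : PySem.Dict Char Int × Nat :=
  if h : i < p.length then (trvCount t.1 p[i], t.2 + 1) else t

theorem trvBump_get? (ts : List (PySem.Dict Char Int × Nat)) (p : List Char) (i : Nat) :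
    (trvBump ts p)[i]? = (ts[i]?).map (fun t => trvStep i t p) := by
  induction ts generalizing p i with
  | nil => cases p <;> simp [trvBump]
  | cons t ts ih =>
    cases p with
    | nil => simp [trvBump, trvStep]
    | cons ch rest =>
      obtain ⟨c, m⟩ := t
      cases i with
      | zero => simp [trvBump, trvStep]
      | succ j => simp [trvBump, ih, trvStep]

theorem trvTables_get? (ps : List (List Char)) (ts : List (PySem.Dict Char Int × Nat)) (i : Nat) :
    (ps.foldl trvBump ts)[i]? = (ts[i]?).map (fun t => ps.foldl (trvStep i) t) := by
  induction ps generalizing ts with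
  | nil => simp
  | cons p ps ih =>
    simp only [List.foldl_cons, ih, trvBump_get?, Option.map_map]
    cases ts[i]? <;> rfl

theorem trvBump_length (ts : List (PySem.Dict Char Int × Nat)) (p : List Char) :
    (trvBump ts p).length = ts.length := by
  induction ts generalizing p with
  | nil => cases p <;> simp [trvBump]
  | cons t ts ih =>
    cases p with
    | nil => simp [trvBump]
    | cons ch rest => obtain ⟨c, m⟩ := t; simp [trvBump, ih]

theorem trvTables_length (ps : List (List Char)) (ts : List (PySem.Dict Char Int × Nat)) :
    (ps.foldl trvBump ts).length = ts.length := by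
  induction ps generalizing ts with
  | nil => rfl
  | cons p ps ih => simp [List.foldl_cons, ih, trvBump_length]

-- A's fused pair fold at position i, split into its two components; and B's trvStep fold likewise
theorem trvFoldA_split (ps : List (List Char)) (i : Nat) (a : PySem.Dict Char Int) (b : Nat) :
    ps.foldl
      (fun (st : PySem.Dict Char Int × Nat) p =>
        if h : i < p.length then (trvCount st.1 p[i], st.2) else (st.1, st.2 + 1)) (a, b)
    = (ps.foldl (fun c p => if h : i < p.length then trvCount c p[i] else c) a,
       b + ps.countP (fun p => decide (¬ i < p.length))) := by
  induction ps generalizing a b with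
  | nil => simp
  | cons p ps ih =>
    rw [List.foldl_cons, List.countP_cons]
    by_cases h : i < p.length
    · rw [dif_pos h, ih]; simp [h]
    · rw [dif_neg h, ih]; simp [h, Prod.ext_iff]; omega

theorem trvFoldB_split (ps : List (List Char)) (i : Nat) (a : PySem.Dict Char Int) (b : Nat) :
    ps.foldl (trvStep i) (a, b)
    = (ps.foldl (fun c p => if h : i < p.length then trvCount c p[i] else c) a,
       b + ps.countP (fun p => decide (i < p.length))) := by
  induction ps generalizing a b with
  | nil => simp
  | cons p ps ih =>
    rw [List.foldl_cons]
    by_cases h : i < p.length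
    · rw [show trvStep i (a, b) p = (trvCount a p[i], b + 1) from by simp [trvStep, h], ih]
      simp [h, Prod.ext_iff]; omega
    · rw [show trvStep i (a, b) p = (a, b) from by simp [trvStep, h], ih]
      simp [h]

theorem trvLoop_agree (ps : List (List Char)) (maxLen : Nat) (i : Nat) (acc : List Char) :
    trvLoopA ps maxLen i acc
      = acc ++ trvLoopB ps.length
          ((ps.foldl trvBump (List.replicate maxLen ((PySem.Dict.empty : PySem.Dict Char Int), 0))).drop i) := by
  set tables := ps.foldl trvBump (List.replicate maxLen ((PySem.Dict.empty : PySem.Dict Char Int), 0)) with htab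
  have hlen : tables.length = maxLen := by
    rw [htab, trvTables_length, List.length_replicate]
  induction h : maxLen - i generalizing i acc with
  | zero =>
    have hge : maxLen ≤ i := by omega
    rw [trvLoopA, if_neg (by omega), List.drop_eq_nil_of_le (by omega), trvLoopB]
    simp
  | succ k ih =>
    have hi : i < maxLen := by omega
    have hget : tables[i]? = some (ps.foldl (trvStep i) ((PySem.Dict.empty : PySem.Dict Char Int), 0)) := by
      rw [htab, trvTables_get?]
      simp [hi]
    have hilt : i < tables.length := by omega
    have hdrop : tables.drop i = ps.foldl (trvStep i) ((PySem.Dict.empty : PySem.Dict Char Int), 0) :: tables.drop (i + 1) := by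
      rw [← List.getElem_cons_drop hilt]
      congr 1
      have hsome : tables[i]? = some tables[i] := List.getElem?_eq_getElem hilt
      rw [hsome] at hget
      exact Option.some_inj.mp hget
    rw [trvLoopA, if_pos hi, hdrop, trvLoopB]
    rw [trvFoldA_split, trvFoldB_split]
    have hsum : ps.countP (fun p => decide (¬ i < p.length)) + ps.countP (fun p => decide (i < p.length)) = ps.length := by
      rw [Nat.add_comm, List.length_eq_countP_add_countP (p := fun p => decide (i < p.length))]
      congr 1
      apply List.countP_congr; intro p _; simp
    simp only [Nat.zero_add]
    by_cases hbr : 2 * (ps.countP (fun p => decide (¬ i < p.length))) > ps.length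
    · rw [if_pos hbr, if_pos (by omega)]
      simp
    · rw [if_neg hbr, if_neg (by omega)]
      rw [ih (i + 1) _ (by omega)]
      simp

-- ===== VERDICT (by name: the statement is the Claim_ definition above) =====
theorem temporal_redundancy_voting_spec : Claim_equal_temporal_redundancy_voting := by
  intro plates _ _
  unfold Spec_temporal_redundancy_voting temporal_redundancy_voting temporal_redundancy_voting_alt
  simp only [trvLoop_agree, List.drop_zero, List.nil_append]
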